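-- pv_equiv track=rewrite | github.com/alopolska2018/AliScraper | ali/ali/sync_db_woocommerce.py | get_all_variants_attributes
-- ===== SOURCE A (Python) =====
-- def get_all_variants_attributes(variants):
--     available_attributes = {}
--     colour_list = []
--     size_list = []
--     length_list = []
--     available_attributes['colour'] = colour_list
--     available_attributes['size'] = size_list
--     available_attributes['length'] = length_list
--     for key, val in variants.items():
--         if 'colour' in val:
--             colour = val['colour']
--             if colour not in colour_list:
--                 colour_list.append(colour)
--
--         if 'size' in val:
--             size = val['size']
--             if size not in size_list:
--                 size_list.append(size)
--
--         if 'length' in val: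
--             length = val['length']
--             if length not in length_list:
--                 length_list.append(length)
--
--     return available_attributes
-- ===== SOURCE B (Python) =====
-- def get_all_variants_attributes(variants):
--     # Flatten to a tagged (name, value) stream, dedup the stream once globally,
--     # then bucket the surviving pairs into per-attribute lists.
--     names = ('colour', 'size', 'length')
--     pairs = dict.fromkeys(
--         (n, v[n]) for v in variants.values() for n in names if n in v)
--     out = {n: [] for n in names}
--     for n, x in pairs:
--         out[n].append(x)
--     return out
-- ===== Notes on version B (the rewrite author's own statement) =====
-- stated objective: alternative
-- what changed: Replaces A's single scan maintaining three parallel lists with per-value membership tests by a flatten/dedup/group pipeline: flatten all variants into one tagged (name, value) stream, deduplicate that stream once globally with dict.fromkeys, then bucket the surviving pairs into the three lists.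
import Mathlib
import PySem

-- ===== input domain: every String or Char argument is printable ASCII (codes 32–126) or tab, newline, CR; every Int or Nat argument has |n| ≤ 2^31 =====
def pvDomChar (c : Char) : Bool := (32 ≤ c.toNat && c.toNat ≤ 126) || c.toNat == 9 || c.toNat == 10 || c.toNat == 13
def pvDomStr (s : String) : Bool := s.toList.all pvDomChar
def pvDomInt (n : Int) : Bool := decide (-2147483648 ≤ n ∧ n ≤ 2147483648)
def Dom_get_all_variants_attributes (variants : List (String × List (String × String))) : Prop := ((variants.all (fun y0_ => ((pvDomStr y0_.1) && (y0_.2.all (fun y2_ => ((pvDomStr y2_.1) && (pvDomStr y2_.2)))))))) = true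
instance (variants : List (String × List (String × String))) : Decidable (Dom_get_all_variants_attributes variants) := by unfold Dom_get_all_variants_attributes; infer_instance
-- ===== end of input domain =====

-- B replaces A's single scan with three parallel membership-checked lists by a
-- flatten / global-dedup / group-by pipeline; same return value, objective: alternative.

-- ===== PORT A =====
-- one pass over variants.items(), three "if key in val: append if unseen" blocks over a triple of lists
def get_all_variants_attributes (variants : List (String × List (String × String))) : List (String × List String) :=
  let st := variants.foldl
    (fun (st : List String × List String × List String) kv =>
      let v : PySem.Dict String String := PySem.Dict.mk kv.2
      let cl := if v.contains "colour" then
          (let colour := v.getD "colour" ""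
           if colour ∈ st.1 then st.1 else st.1 ++ [colour]) else st.1
      let sl := if v.contains "size" then
          (let size := v.getD "size" ""
           if size ∈ st.2.1 then st.2.1 else st.2.1 ++ [size]) else st.2.1
      let ll := if v.contains "length" then
          (let length := v.getD "length" ""
           if length ∈ st.2.2 then st.2.2 else st.2.2 ++ [length]) else st.2.2
      (cl, sl, ll))
    ([], [], [])
  [("colour", st.1), ("size", st.2.1), ("length", st.2.2)]

-- ===== PORT B =====
-- flatten to tagged (name, value) pairs; list(dict.fromkeys(…)) = PySem.List.dedup; bucket into out
def get_all_variants_attributes_alt (variants : List (String × List (String × String))) : List (String × List String) :=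
  let names : List String := ["colour", "size", "length"]
  let pairs := PySem.List.dedup (variants.flatMap (fun kv =>
    names.filterMap (fun n =>
      let v : PySem.Dict String String := PySem.Dict.mk kv.2
      if v.contains n then some (n, v.getD n "") else none)))
  let out : PySem.Dict String (List String) :=
    pairs.foldl (fun d p => d.modify p.1 [] (fun l => l ++ [p.2]))
      (PySem.Dict.mk (names.map (fun n => (n, []))))
  out.items

-- ===== PRECONDITION & SPEC =====
def Spec_get_all_variants_attributes (variants : List (String × List (String × String))) (out : List (String × List String)) : Prop := out = get_all_variants_attributes_alt variants
instance (variants : List (String × List (String × String))) (out : List (String × List String)) : Decidable (Spec_get_all_variants_attributes variants out) := by unfold Spec_get_all_variants_attributes; infer_instance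

-- ===== CLAIM (what is proved, stated in full; the proofs are below) =====
def Claim_equal_get_all_variants_attributes : Prop := ∀ (variants : List (String × List (String × String))), Dom_get_all_variants_attributes variants → Spec_get_all_variants_attributes variants (get_all_variants_attributes variants)

-- ===== LEMMAS AND PROOFS =====

-- the optional attribute value of one variant
def pvVal (name : String) (kv : String × List (String × String)) : Option String :=
  let v : PySem.Dict String String := PySem.Dict.mk kv.2
  if v.contains name then some (v.getD name "") else none

-- one component of A's fold: collect-if-present with in-place dedup
def pvStep (name : String) (acc : List String) (kv : String × List (String × String)) : List String :=
  let v : PySem.Dict String String := PySem.Dict.mk kv.2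
  if v.contains name then
    (let x := v.getD name ""
     if x ∈ acc then acc else acc ++ [x])
  else acc

-- project the tagged stream back to one attribute
def pvProj (name : String) (p : String × String) : Option String :=
  if p.1 == name then some p.2 else none

-- A's triple fold decomposes into three independent folds
theorem pvFold_split (variants : List (String × List (String × String)))
    (st : List String × List String × List String) :
    variants.foldl
      (fun (st : List String × List String × List String) kv =>
        let v : PySem.Dict String String := PySem.Dict.mk kv.2
        let cl := if v.contains "colour" then
            (let colour := v.getD "colour" ""
             if colour ∈ st.1 then st.1 else st.1 ++ [colour]) else st.1
        let sl := if v.contains "size" then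
            (let size := v.getD "size" ""
             if size ∈ st.2.1 then st.2.1 else st.2.1 ++ [size]) else st.2.1
        let ll := if v.contains "length" then
            (let length := v.getD "length" ""
             if length ∈ st.2.2 then st.2.2 else st.2.2 ++ [length]) else st.2.2
        (cl, sl, ll)) st
    = (variants.foldl (pvStep "colour") st.1,
       variants.foldl (pvStep "size") st.2.1,
       variants.foldl (pvStep "length") st.2.2) := by
  induction variants generalizing st with
  | nil => rfl
  | cons kv rest ih => simp only [List.foldl_cons, ih]; rfl

-- one step of A's dedup-append is a PySem.Set.add of the optional value
theorem pvStep_eq_add (name : String) (acc : List String) (kv : String × List (String × String)) :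
    pvStep name acc kv = match pvVal name kv with
      | some x => PySem.Set.add acc x
      | none => acc := by
  simp only [pvStep, pvVal, PySem.Set.add_eq_ite]
  split <;> rfl

-- the per-name fold is the ordered dedup of the per-name value stream
theorem pvFold_eq_ofList (name : String)
    (variants : List (String × List (String × String))) :
    variants.foldl (pvStep name) [] = PySem.Set.ofList (variants.filterMap (pvVal name)) := by
  suffices h : ∀ acc : PySem.Set String, variants.foldl (pvStep name) acc
      = PySem.Set.update acc (variants.filterMap (pvVal name)) by
    simpa [PySem.Set.update_nil_left] using h []
  induction variants with
  | nil => intro acc; rfl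
  | cons kv rest ih =>
    intro acc
    simp only [List.foldl_cons, List.filterMap_cons, pvStep_eq_add]
    cases h : pvVal name kv with
    | none => simp [ih]
    | some x => simp [ih, PySem.Set.update_cons]

-- ordered dedup commutes with a projection injective on its support
theorem pvOfList_filterMap {α β : Type} [BEq α] [LawfulBEq α] [BEq β] [LawfulBEq β]
    (f : α → Option β) (hinj : ∀ a a' b, f a = some b → f a' = some b → a = a')
    (l : List α) :
    (PySem.Set.ofList l).filterMap f = PySem.Set.ofList (l.filterMap f) := by
  suffices h : ∀ s : PySem.Set α, (PySem.Set.update s l).filterMap f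
      = PySem.Set.update (s.filterMap f) (l.filterMap f) by
    simpa [PySem.Set.update_nil_left] using h []
  induction l with
  | nil => intro s; rfl
  | cons a l ih =>
    intro s
    simp only [PySem.Set.update_cons, List.filterMap_cons]
    cases hfa : f a with
    | none =>
      have : List.filterMap f (PySem.Set.add s a) = s.filterMap f := by
        by_cases hm : a ∈ s
        · simp [PySem.Set.add_of_mem hm]
        · simp [PySem.Set.add_of_not_mem hm, hfa]
      rw [ih, this]
    | some b =>
      have hadd : List.filterMap f (PySem.Set.add s a)
          = PySem.Set.add (s.filterMap f) b := by
        by_cases hm : a ∈ s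
        · have hb : b ∈ s.filterMap f := List.mem_filterMap.2 ⟨a, hm, hfa⟩
          simp [PySem.Set.add_of_mem hm, PySem.Set.add_of_mem hb]
        · have hb : b ∉ s.filterMap f := by
            intro hb
            rcases List.mem_filterMap.1 hb with ⟨a', ha', hfa'⟩
            exact hm (hinj a a' b hfa hfa' ▸ ha')
          simp [PySem.Set.add_of_not_mem hm, PySem.Set.add_of_not_mem hb, hfa]
      rw [PySem.Set.update_cons, ih, hadd]

-- the per-variant tagged contribution, projected to one of the three names
theorem pvInner (name : String) (hname : name ∈ (["colour", "size", "length"] : List String))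
    (kv : String × List (String × String)) :
    ((["colour", "size", "length"] : List String).filterMap (fun n =>
      let v : PySem.Dict String String := PySem.Dict.mk kv.2
      if v.contains n then some (n, v.getD n "") else none)).filterMap (pvProj name)
    = (pvVal name kv).toList := by
  simp only [List.mem_cons, List.not_mem_nil, or_false] at hname
  rcases hname with h | h | h <;> subst h <;>
    simp only [List.filterMap_cons, List.filterMap_nil, pvVal] <;>
    cases hc : (PySem.Dict.mk kv.2 : PySem.Dict String String).contains "colour" <;>
    cases hs : (PySem.Dict.mk kv.2 : PySem.Dict String String).contains "size" <;>
    cases hl : (PySem.Dict.mk kv.2 : PySem.Dict String String).contains "length" <;>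
      simp [pvProj]

-- projecting the flat tagged stream to one of the three names gives that name's value stream
theorem pvProj_flat (name : String) (hname : name ∈ (["colour", "size", "length"] : List String))
    (variants : List (String × List (String × String))) :
    (variants.flatMap (fun kv =>
      (["colour", "size", "length"] : List String).filterMap (fun n =>
        let v : PySem.Dict String String := PySem.Dict.mk kv.2
        if v.contains n then some (n, v.getD n "") else none))).filterMap (pvProj name)
    = variants.filterMap (pvVal name) := by
  rw [List.filterMap_flatMap]
  simp only [pvInner name hname]
  rw [← List.filterMap_eq_flatMap_toList]

-- filter-by-name then project = filterMap of the tagged projection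
theorem pvFilterEq (k : String) (l : List (String × String)) :
    (l.filter (fun p => p.1 == k)).map (fun p => p.2) = l.filterMap (pvProj k) := by
  induction l with
  | nil => rfl
  | cons p l ih =>
    by_cases h : p.1 = k <;> simp [pvProj, h, ih]

-- pvProj k is injective on its support
theorem pvProj_inj (k : String) : ∀ p p' (b : String),
    pvProj k p = some b → pvProj k p' = some b → p = p' := by
  rintro ⟨a, x⟩ ⟨a', x'⟩ b h h'
  simp only [pvProj] at h h'
  split_ifs at h h'; simp_all

-- every tagged pair carries one of the three names
theorem pvFst_mem (variants : List (String × List (String × String)))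
    (p : String × String)
    (hp : p ∈ variants.flatMap (fun kv =>
      (["colour", "size", "length"] : List String).filterMap (fun n =>
        let v : PySem.Dict String String := PySem.Dict.mk kv.2
        if v.contains n then some (n, v.getD n "") else none))) :
    p.1 ∈ (["colour", "size", "length"] : List String) := by
  rcases List.mem_flatMap.1 hp with ⟨kv, _, hin⟩
  rcases List.mem_filterMap.1 hin with ⟨n, hn, hsome⟩
  simp only at hsome
  split at hsome
  · cases hsome; exact hn
  · cases hsome

-- the bucketing fold over a tagged stream whose names all lie in the three keys
theorem pvGroup (pairs : List (String × String))
    (hk : ∀ p ∈ pairs, p.1 ∈ (["colour", "size", "length"] : List String)) :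
    (pairs.foldl (fun d p => d.modify p.1 [] (fun l => l ++ [p.2]))
      (PySem.Dict.mk [("colour", ([] : List String)), ("size", []), ("length", [])])).items
    = [("colour", pairs.filterMap (pvProj "colour")),
       ("size", pairs.filterMap (pvProj "size")),
       ("length", pairs.filterMap (pvProj "length"))] := by
  set d0 : PySem.Dict String (List String) :=
    PySem.Dict.mk [("colour", []), ("size", []), ("length", [])] with hd0
  set out := pairs.foldl (fun d p => d.modify p.1 [] (fun l => l ++ [p.2])) d0 with hout
  have hkeys : out.keys = ["colour", "size", "length"] := by
    rw [hout, PySem.Dict.keys_foldl_modify_key]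
    have hdk : d0.keys = ["colour", "size", "length"] := by decide
    rw [hdk, PySem.Set.update_eq_append_filter]
    have : (PySem.Set.ofList (pairs.map Prod.fst)).filter
        (fun y => !(PySem.Set.contains (["colour", "size", "length"] : List String) y)) = [] := by
      rw [List.filter_eq_nil_iff]
      intro y hy
      rcases List.mem_map.1 ((PySem.Set.mem_ofList _ _).1 hy) with ⟨p, hp, rfl⟩
      have h : PySem.Set.contains (["colour", "size", "length"] : List String) p.1 = true :=
        (PySem.Set.contains_iff _ _).2 (hk p hp)
      simp only [h]; simp
    rw [this, List.append_nil]
  have hnd : out.keys.Nodup := by rw [hkeys]; decide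
  rw [PySem.Dict.items_eq_map_keys out hnd [], hkeys]
  have hgetD : ∀ k, out.getD k [] = d0.getD k [] ++ (pairs.filter (fun p => p.1 == k)).map (fun p => p.2) := by
    intro k; rw [hout]; exact PySem.Dict.getD_foldl_modify_append pairs d0 k
  simp only [List.map_cons, List.map_nil, hgetD]
  have h1 : d0.getD "colour" [] = [] := by decide
  have h2 : d0.getD "size" [] = [] := by decide
  have h3 : d0.getD "length" [] = [] := by decide
  rw [h1, h2, h3]
  simp only [List.nil_append, pvFilterEq]

theorem get_all_variants_attributes_spec : Claim_equal_get_all_variants_attributes := by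
  intro variants _
  show get_all_variants_attributes variants = get_all_variants_attributes_alt variants
  simp only [get_all_variants_attributes, get_all_variants_attributes_alt, pvFold_split,
    PySem.List.dedup_eq_ofList, List.map_cons, List.map_nil]
  rw [pvGroup _ (fun p hp => pvFst_mem variants p ((PySem.Set.mem_ofList _ _).1 hp))]
  rw [pvOfList_filterMap (pvProj "colour") (pvProj_inj "colour"),
      pvOfList_filterMap (pvProj "size") (pvProj_inj "size"),
      pvOfList_filterMap (pvProj "length") (pvProj_inj "length"),
      pvProj_flat "colour" (by decide), pvProj_flat "size" (by decide),
      pvProj_flat "length" (by decide), pvFold_eq_ofList, pvFold_eq_ofList, pvFold_eq_ofList]
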